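-- pv_equiv track=rewrite | github.com/Waterbootdev/abstract-puzzle-generator | generate_functions.py | generate_rotated
-- ===== SOURCE A (Python) =====
-- from itertools import chain, starmap
-- from copy import copy
--
-- def generate_rotated(width, height):
--     if height > width or width < 2 or height < 2:
--         raise Exception()
--
--     right = width
--     down = height - 1
--     left = width - 1
--     up = height - 2
--
--     step_counts = []
--
--     if height == 2:
--         step_counts = [right,down, left]
--     else:
--         frame = [right, down, left, up]
--
--         step_counts = copy(frame)
--
--         while frame[-1] > 2:
--             frame = [steps - 2 for steps in frame]
--             step_counts.extend(frame)
--
--         (last_right, last_down, last_left, last_up) = tuple(frame)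
--
--         match last_up:
--             case 1:
--                 step_counts.append(last_right - 2)
--             case 2:
--                 step_counts.extend([last_right - 2, last_down - 2, last_left -2])
--
--     rotated = list(chain.from_iterable(map(lambda steps_without_rotation : [False for _ in range(steps_without_rotation - 1)] + [True], step_counts)))
--
--     rotated[-1] = False
--
--     assert len(rotated) == width * height
--     return rotated
-- ===== SOURCE B (Python) =====
-- def _seg(n):
--     return [False] * (n - 1) + [True]
--
-- def generate_rotated(width, height):
--     if height > width or width < 2 or height < 2:
--         raise Exception()
--     out = []
--     w, h = width, height
--     while h > 2:
--         out += _seg(w) + _seg(h - 1) + _seg(w - 1) + _seg(h - 2)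
--         w -= 2
--         h -= 2
--     if h == 1:
--         out += [False] * w
--     else:
--         out += _seg(w) + _seg(1) + [False] * (w - 1)
--     return out
-- ===== Notes on version B (the rewrite author's own statement) =====
-- stated objective: simpler
-- what changed: B emits the boolean blocks directly ring-by-ring with natural bases for the innermost single/double row, eliminating A's frame list, step_counts accumulation, the match on last_up, the chain/flatten pass and the final in-place rotated[-1] mutation.
import Mathlib
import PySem

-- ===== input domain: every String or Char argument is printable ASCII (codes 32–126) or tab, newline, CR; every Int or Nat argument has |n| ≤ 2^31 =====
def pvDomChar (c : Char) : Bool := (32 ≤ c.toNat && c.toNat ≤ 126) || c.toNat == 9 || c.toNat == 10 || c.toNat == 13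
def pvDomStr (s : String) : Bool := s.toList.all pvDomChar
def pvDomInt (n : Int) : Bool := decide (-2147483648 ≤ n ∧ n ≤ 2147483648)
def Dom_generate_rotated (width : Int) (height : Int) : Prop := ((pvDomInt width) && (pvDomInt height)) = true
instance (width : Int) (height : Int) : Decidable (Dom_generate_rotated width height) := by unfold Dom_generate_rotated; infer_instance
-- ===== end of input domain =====

-- B replaces A's step-count bookkeeping (frame list, while loop, match) by direct ring-by-ring
-- emission of the boolean blocks; objective: simpler. Equivalence is about the return value.

-- ===== PORT A =====
-- the while loop: frame is always a 4-element list; fuel (height-2).toNat bounds the iterations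
def pvLoopA : Nat → List Int → List Int → (List Int × List Int)
  | 0, frame, sc => (frame, sc)
  | n + 1, frame, sc =>
    if (frame.getLast?.getD 0) > 2 then
      let f2 := frame.map (· - 2)
      pvLoopA n f2 (sc ++ f2)
    else (frame, sc)

def generate_rotated (width : Int) (height : Int) : List Bool :=
  if height > width ∨ width < 2 ∨ height < 2 then []  -- Python raises here; excluded by Pre_
  else
    let right := width
    let down := height - 1
    let left := width - 1
    let up := height - 2
    let step_counts : List Int :=
      if height == 2 then [right, down, left]
      else
        let frame := [right, down, left, up]
        let p := pvLoopA up.toNat frame frame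
        -- (last_right, last_down, last_left, last_up) = tuple(frame); match last_up
        match p.1 with
        | [lr, ld, ll, lu] =>
          if lu == 1 then p.2 ++ [lr - 2]
          else if lu == 2 then p.2 ++ [lr - 2, ld - 2, ll - 2]
          else p.2
        | _ => p.2
    let rotated := step_counts.flatMap
      (fun s => List.replicate (s - 1).toNat false ++ [true])
    rotated.dropLast ++ [false]  -- rotated[-1] = False (rotated is nonempty on every admitted input)

-- ===== PORT B =====
def pvSeg (n : Int) : List Bool := List.replicate (n - 1).toNat false ++ [true]

-- the while loop of Source B, state (w, h, out)
def pvRingsB (w : Int) (h : Int) (out : List Bool) : List Bool :=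
  if hgt : h > 2 then
    pvRingsB (w - 2) (h - 2) (out ++ (pvSeg w ++ pvSeg (h - 1) ++ pvSeg (w - 1) ++ pvSeg (h - 2)))
  else if h == 1 then out ++ List.replicate w.toNat false
  else out ++ (pvSeg w ++ pvSeg 1 ++ List.replicate (w - 1).toNat false)
termination_by h.toNat
decreasing_by omega

def generate_rotated_alt (width : Int) (height : Int) : List Bool :=
  if height > width ∨ width < 2 ∨ height < 2 then []  -- Python raises here; excluded by Pre_
  else pvRingsB width height []

-- ===== PRECONDITION & SPEC =====
-- Pre_ excludes exactly the inputs on which A raises its explicit Exception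
def Pre_generate_rotated (width : Int) (height : Int) : Prop :=
  height ≤ width ∧ 2 ≤ width ∧ 2 ≤ height
instance (width : Int) (height : Int) : Decidable (Pre_generate_rotated width height) := by
  unfold Pre_generate_rotated; infer_instance
def pvWitness_generate_rotated : Int × Int := (3, 2)

def Spec_generate_rotated (width : Int) (height : Int) (out : List Bool) : Prop := out = generate_rotated_alt width height
instance (width : Int) (height : Int) (out : List Bool) : Decidable (Spec_generate_rotated width height out) := by unfold Spec_generate_rotated; infer_instance

-- ===== CLAIM (what is proved, stated in full; the proofs are below) =====
def Claim_equal_generate_rotated : Prop := ∀ (width : Int) (height : Int), Dom_generate_rotated width height → Pre_generate_rotated width height → Spec_generate_rotated width height (generate_rotated width height)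

-- ===== LEMMAS AND PROOFS =====

-- proof-side: the list of step counts, ring by ring
def pvSc (w : Int) (h : Int) : List Int :=
  if hgt : h > 2 then [w, h - 1, w - 1, h - 2] ++ pvSc (w - 2) (h - 2)
  else if h == 1 then [w]
  else [w, 1, w - 1]
termination_by h.toNat
decreasing_by omega

-- proof-side: what the while loop + match produce after the initial frame
def pvFrameRun (r d l u : Int) : List Int :=
  if hgt : u > 2 then [r - 2, d - 2, l - 2, u - 2] ++ pvFrameRun (r - 2) (d - 2) (l - 2) (u - 2)
  else if u == 1 then [r - 2]
  else if u == 2 then [r - 2, d - 2, l - 2]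
  else []
termination_by u.toNat
decreasing_by omega

lemma pvLoopA_match (n : Nat) (r d l u : Int) (acc : List Int)
    (hn : u ≤ 2 * n + 2) :
    (match (pvLoopA n [r, d, l, u] acc).1 with
      | [lr, ld, ll, lu] =>
        if lu == 1 then (pvLoopA n [r, d, l, u] acc).2 ++ [lr - 2]
        else if lu == 2 then (pvLoopA n [r, d, l, u] acc).2 ++ [lr - 2, ld - 2, ll - 2]
        else (pvLoopA n [r, d, l, u] acc).2
      | _ => (pvLoopA n [r, d, l, u] acc).2)
    = acc ++ pvFrameRun r d l u := by
  induction n generalizing r d l u acc with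
  | zero =>
    have hu : ¬ u > 2 := by omega
    simp only [pvLoopA]
    rw [pvFrameRun]
    simp only [hu, dite_false, if_false]
    split_ifs with h1 h2 <;> simp_all
  | succ n ih =>
    by_cases hu : u > 2
    · have hl : ([r, d, l, u].getLast?.getD 0) = u := by simp
      have hmap : [r, d, l, u].map (· - 2) = [r - 2, d - 2, l - 2, u - 2] := by simp
      simp only [pvLoopA, hl, hu, if_true, hmap]
      have hih := ih (r - 2) (d - 2) (l - 2) (u - 2) (acc ++ [r - 2, d - 2, l - 2, u - 2])
        (by push_cast at hn ⊢; omega)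
      rw [hih]
      conv_rhs => rw [pvFrameRun]
      simp only [hu, dite_true, List.append_assoc, List.cons_append, List.nil_append]
    · have hl : ([r, d, l, u].getLast?.getD 0) = u := by simp
      simp only [pvLoopA, hl, hu, if_false]
      rw [pvFrameRun]
      simp only [hu, dite_false]
      split_ifs with h1 h2 <;> simp_all

lemma pvFrameRun_eq_sc (w h : Int) (hh : 3 ≤ h) :
    pvFrameRun w (h - 1) (w - 1) (h - 2) = pvSc (w - 2) (h - 2) := by
  have hn : 0 ≤ h := by omega
  induction hnat : h.toNat using Nat.strong_induction_on generalizing w h with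
  | _ n ih =>
    by_cases hu : h - 2 > 2
    · rw [pvFrameRun, pvSc]
      simp only [hu, dite_true]
      have h5 : 3 ≤ h - 2 := by omega
      have hih := ih ((h - 2).toNat) (by omega) (w - 2) (h - 2) h5 (by omega) rfl
      rw [show h - 1 - 2 = h - 2 - 1 by ring, show w - 1 - 2 = w - 2 - 1 by ring, hih]
    · rw [pvFrameRun, pvSc]
      simp only [hu, dite_false]
      by_cases h1 : h - 2 = 1
      · simp [h1]
      · have h2 : h - 2 = 2 := by omega
        simp only [h2, show ((2:Int) == 1) = false by decide, if_false,
          show ((2:Int) == 2) = true by decide, if_true]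
        have : h - 1 - 2 = 1 := by omega
        rw [this, show w - 1 - 2 = w - 2 - 1 by ring]

-- mark: flip the final element to false (A's rotated[-1] = False)
lemma mark_append (a b : List Bool) (hb : b ≠ []) :
    (a ++ b).dropLast ++ [false] = a ++ (b.dropLast ++ [false]) := by
  rw [List.dropLast_append_of_ne_nil hb, List.append_assoc]

lemma mark_seg (s : Int) (hs : 1 ≤ s) :
    (pvSeg s).dropLast ++ [false] = List.replicate s.toNat false := by
  unfold pvSeg
  rw [List.dropLast_concat]
  rw [show s.toNat = (s - 1).toNat + 1 by omega, List.replicate_succ' (n := (s-1).toNat)]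

lemma flat_nonempty (sc : List Int) (h : sc ≠ []) :
    sc.flatMap (fun s => List.replicate (s - 1).toNat false ++ [true]) ≠ [] := by
  cases sc with
  | nil => simp at h
  | cons x xs => simp [List.flatMap]

lemma pvRingsB_acc (w h : Int) (out : List Bool) :
    pvRingsB w h out = out ++ pvRingsB w h [] := by
  induction hk : h.toNat using Nat.strong_induction_on generalizing w h out with
  | _ k ihk =>
    conv_lhs => rw [pvRingsB]
    conv_rhs => rw [pvRingsB]
    by_cases hg : h > 2
    · simp only [hg, dite_true]
      rw [ihk (h - 2).toNat (by omega) (w - 2) (h - 2) _ rfl,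
          ihk (h - 2).toNat (by omega) (w - 2) (h - 2)
            ([] ++ (pvSeg w ++ pvSeg (h - 1) ++ pvSeg (w - 1) ++ pvSeg (h - 2))) rfl]
      simp
    · simp only [hg, dite_false]
      split_ifs <;> simp

lemma pvSc_nonempty (w h : Int) : pvSc w h ≠ [] := by
  rw [pvSc]
  split_ifs <;> simp

lemma mark_flat_sc (w h : Int) (h1 : 1 ≤ h) (hw : h ≤ w) :
    ((pvSc w h).flatMap (fun s => List.replicate (s - 1).toNat false ++ [true])).dropLast ++ [false]
      = pvRingsB w h [] := by
  induction hnat : h.toNat using Nat.strong_induction_on generalizing w h with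
  | _ n ih =>
    by_cases hgt : h > 2
    · rw [pvSc]
      conv_rhs => rw [pvRingsB]
      simp only [hgt, dite_true]
      rw [List.flatMap_append, mark_append _ _ (flat_nonempty _ (pvSc_nonempty _ _))]
      rw [ih ((h - 2).toNat) (by omega) (w - 2) (h - 2) (by omega) (by omega) rfl]
      conv_rhs => rw [pvRingsB_acc (w - 2) (h - 2)]
      simp [pvSeg]
    · by_cases hone : h = 1
      · subst hone
        rw [pvSc, pvRingsB]
        simp only [show ¬(1:Int) > 2 from by omega, dite_false,
          show ((1:Int) == 1) = true from rfl, if_true,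
          List.flatMap_cons, List.flatMap_nil, List.append_nil, List.nil_append]
        rw [show List.replicate ((w : Int) - 1).toNat false ++ [true] = pvSeg w from rfl,
          mark_seg w (by omega)]
      · have h2 : h = 2 := by omega
        subst h2
        rw [pvSc, pvRingsB]
        simp only [show ¬(2:Int) > 2 from by omega, dite_false,
          show ((2:Int) == 1) = false from rfl, Bool.false_eq_true, if_false,
          List.flatMap_cons, List.flatMap_nil, List.append_nil, List.nil_append]
        rw [← List.append_assoc,
          mark_append _ (List.replicate ((w : Int) - 1 - 1).toNat false ++ [true]) (by simp)]
        rw [show List.replicate ((w : Int) - 1 - 1).toNat false ++ [true] = pvSeg (w - 1) from rfl,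
          mark_seg (w - 1) (by omega)]
        simp [pvSeg]

-- ===== VERDICT (by name: the statement is the Claim_ definition above) =====
theorem generate_rotated_spec : Claim_equal_generate_rotated := by
  intro width height hdom hpre
  obtain ⟨hwh, hw2, hh2⟩ := hpre
  unfold Spec_generate_rotated generate_rotated generate_rotated_alt
  have hguard : ¬ (height > width ∨ width < 2 ∨ height < 2) := by omega
  simp only [hguard, if_false]
  by_cases h2 : height = 2
  · subst h2
    simp only [show ((2:Int) == 2) = true by decide, if_true]
    have hsc : pvSc width 2 = [width, 1, width - 1] := by
      rw [pvSc]; norm_num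
    have := mark_flat_sc width 2 (by omega) hwh
    rw [hsc] at this
    rw [show (2:Int) - 1 = 1 by ring] at *
    exact this
  · have hbe : (height == 2) = false := by simp [h2]
    simp only [hbe, if_false]
    have hloop := pvLoopA_match (height - 2).toNat width (height - 1) (width - 1) (height - 2)
      [width, height - 1, width - 1, height - 2] (by omega)
    simp only [hloop]
    have hfr := pvFrameRun_eq_sc width height (by omega)
    rw [hfr]
    have hsc : pvSc width height = [width, height - 1, width - 1, height - 2] ++ pvSc (width - 2) (height - 2) := by
      rw [pvSc]; simp only [show height > 2 by omega, dite_true]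
    have := mark_flat_sc width height (by omega) hwh
    rw [hsc] at this
    exact this
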